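-- pv_equiv track=rewrite | github.com/barbora4/HyperLTLMSO | src/automata.py | create_symbol_map
-- ===== SOURCE A (Python) =====
-- def create_symbol_map(length: int):
--     if length <= 0:
--         return []
--
--     binary_numbers = []
--     for i in range(2 ** length):
--         binary_string = bin(i)[2:].zfill(length)
--         binary_numbers.append(binary_string)
--
--     result = dict()
--     for index, item in enumerate(binary_numbers):
--         result[item] = index
--
--     return result
-- ===== SOURCE B (Python) =====
-- def create_symbol_map(length: int):
--     if length <= 0:
--         return []
--
--     def gen(n):
--         # all binary strings of width n, '0'-branch first => increasing integer order
--         if n == 0: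
--             return ['']
--         return [b + rest for b in '01' for rest in gen(n - 1)]
--
--     return {s: i for i, s in enumerate(gen(length))}
-- ===== Notes on version B (the rewrite author's own statement) =====
-- stated objective: alternative
-- what changed: B generates the binary strings by recursion on the width (prefixing '0' then '1' to all shorter strings) instead of converting each integer in range(2**length) with bin()/zfill, and builds the mapping with a dict comprehension over enumerate.
import Mathlib
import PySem

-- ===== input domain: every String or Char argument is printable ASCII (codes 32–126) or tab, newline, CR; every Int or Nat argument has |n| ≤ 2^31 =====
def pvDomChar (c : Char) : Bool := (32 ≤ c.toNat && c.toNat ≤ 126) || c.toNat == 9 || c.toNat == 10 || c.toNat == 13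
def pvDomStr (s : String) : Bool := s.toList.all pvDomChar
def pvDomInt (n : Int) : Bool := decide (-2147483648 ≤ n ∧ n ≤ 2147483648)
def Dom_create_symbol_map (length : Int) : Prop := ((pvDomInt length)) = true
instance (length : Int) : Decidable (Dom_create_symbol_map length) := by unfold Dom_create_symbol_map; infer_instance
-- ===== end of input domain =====

-- B generates the width-`length` binary strings by recursion on the width ('0'-prefix block then
-- '1'-prefix block) instead of converting each i in range(2**length) with bin()/zfill; same values.


-- ===== PORT A =====
-- literal port: range(2 ** length) is only reached with length > 0, so 2 ** length = 2 ^ length.toNat;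
-- bin(i)[2:].zfill(length) is Str.zfill (Str.slice (pyBin i) 2 _) length; the dict loop is a foldl of inserts.
def create_symbol_map (length : Int) : List (String × Int) :=
  if length ≤ 0 then []
  else
    let binary_numbers : List String :=
      (PySem.List.pyRange 0 ((2 : Int) ^ length.toNat) 1).map
        (fun i => PySem.Str.zfill (PySem.Str.slice (PySem.Int.pyBin i) (some 2) none) length)
    ((PySem.List.enumerate binary_numbers).foldl
        (fun d p => d.insert p.2 p.1) (PySem.Dict.empty : PySem.Dict String Int)).items

-- ===== PORT B =====
-- gen(n) from Source B; strings are represented as their char lists ("01" iterates as ['0','1'],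
-- b + rest is b :: rest), turned into Strings where Source B produces the strings.
def pvGen : Nat → List (List Char)
  | 0 => [[]]
  | n + 1 => "01".toList.flatMap (fun b => (pvGen n).map (fun rest => b :: rest))

def create_symbol_map_alt (length : Int) : List (String × Int) :=
  if length ≤ 0 then []
  else
    ((PySem.List.enumerate ((pvGen length.toNat).map String.ofList)).foldl
        (fun d p => d.insert p.2 p.1) (PySem.Dict.empty : PySem.Dict String Int)).items

-- ===== PRECONDITION & SPEC =====
def Spec_create_symbol_map (length : Int) (out : List (String × Int)) : Prop := out = create_symbol_map_alt length
instance (length : Int) (out : List (String × Int)) : Decidable (Spec_create_symbol_map length out) := by unfold Spec_create_symbol_map; infer_instance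

-- ===== CLAIM (what is proved, stated in full; the proofs are below) =====
def Claim_equal_create_symbol_map : Prop := ∀ (length : Int), Dom_create_symbol_map length → Spec_create_symbol_map length (create_symbol_map length)

-- ===== LEMMAS AND PROOFS =====

/-- `Nat.toDigits 2` without the fuel: binary digits of `k`, most significant first. -/
def pvDigits (k : Nat) : List Char :=
  if h : k / 2 = 0 then [Nat.digitChar (k % 2)]
  else pvDigits (k / 2) ++ [Nat.digitChar (k % 2)]
termination_by k
decreasing_by omega

/-- the last `n` binary digits of `k`, zero-padded to width `n` (LSB-recursion). -/
def pvStrL : Nat → Nat → List Char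
  | 0, _ => []
  | n + 1, k => pvStrL n (k / 2) ++ [Nat.digitChar (k % 2)]

lemma pvToDigitsCore_eq (fuel : Nat) : ∀ (k : Nat) (acc : List Char), k < fuel →
    Nat.toDigitsCore 2 fuel k acc = pvDigits k ++ acc := by
  induction fuel with
  | zero => omega
  | succ f ih =>
    intro k acc h
    rw [Nat.toDigitsCore, pvDigits]
    by_cases h2 : k / 2 = 0
    · simp [h2]
    · simp only [h2, if_false]
      rw [ih (k / 2) _ (by omega)]
      simp

lemma pvToDigits_eq (k : Nat) : Nat.toDigits 2 k = pvDigits k := by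
  rw [Nat.toDigits, pvToDigitsCore_eq (k + 1) k [] (by omega)]
  simp

lemma pvDigits_head (k : Nat) : ∃ c t, pvDigits k = c :: t ∧ c ≠ '+' ∧ c ≠ '-' := by
  induction k using Nat.strong_induction_on with
  | _ k ih =>
    rw [pvDigits]
    by_cases h2 : k / 2 = 0
    · refine ⟨Nat.digitChar (k % 2), [], by simp [h2], ?_, ?_⟩ <;>
        (have : k % 2 = 0 ∨ k % 2 = 1 := by omega
         rcases this with h | h <;> simp [h] <;> decide)
    · obtain ⟨c, t, he, h1, hm⟩ := ih (k / 2) (by omega)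
      exact ⟨c, t ++ [Nat.digitChar (k % 2)], by rw [dif_neg h2, he]; rfl, h1, hm⟩

lemma pvZfill_digits (k : Nat) (w : Int) :
    PySem.Chars.zfill (pvDigits k) w
      = List.replicate (w.toNat - (pvDigits k).length) '0' ++ pvDigits k := by
  obtain ⟨c, t, he, h1, hm⟩ := pvDigits_head k
  rw [PySem.Chars.zfill.eq_def]
  by_cases hw : w ≤ ((pvDigits k).length : Int)
  · rw [if_pos hw]
    have : w.toNat - (pvDigits k).length = 0 := by omega
    simp [this]
  · rw [if_neg hw, he]
    simp only [List.length_cons]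
    rw [if_neg (by simp [h1, hm])]

lemma pvStrL_zero (n : Nat) : pvStrL n 0 = List.replicate n '0' := by
  induction n with
  | zero => rfl
  | succ n ih =>
    rw [pvStrL, ih]
    simp [List.replicate_succ' (n := n)]
    rfl

lemma pvDigits_pad (n : Nat) : ∀ k, 1 ≤ n → k < 2 ^ n →
    List.replicate (n - (pvDigits k).length) '0' ++ pvDigits k = pvStrL n k := by
  induction n with
  | zero => omega
  | succ n ih =>
    intro k _ hk
    by_cases hk2 : 2 ≤ k
    · have hn1 : 1 ≤ n := by
        by_contra h
        have : n = 0 := by omega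
        subst this; simp at hk; omega
      have hdiv : k / 2 < 2 ^ n := by
        have hp : 2 ^ (n + 1) = 2 ^ n * 2 := by rw [pow_succ]
        omega
      have hne : ¬ k / 2 = 0 := by omega
      rw [pvDigits, dif_neg hne]
      have hlen : (pvDigits (k / 2) ++ [Nat.digitChar (k % 2)]).length
          = (pvDigits (k / 2)).length + 1 := by simp
      rw [hlen]
      have : n + 1 - ((pvDigits (k / 2)).length + 1) = n - (pvDigits (k / 2)).length := by omega
      rw [this, ← List.append_assoc, ih (k / 2) hn1 hdiv, pvStrL]
    · have : k = 0 ∨ k = 1 := by omega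
      rcases this with h | h <;> subst h <;>
        rw [pvDigits] <;> simp [pvStrL, pvStrL_zero, Nat.digitChar]

lemma pvStrL_cons (n : Nat) : ∀ k, k < 2 ^ (n + 1) →
    pvStrL (n + 1) k = (if k < 2 ^ n then '0' else '1') :: pvStrL n (k % 2 ^ n) := by
  induction n with
  | zero =>
    intro k hk
    have : k = 0 ∨ k = 1 := by omega
    rcases this with h | h <;> subst h <;> rfl
  | succ n ih =>
    intro k hk
    have hp : 2 ^ (n + 2) = 2 ^ (n + 1) * 2 := by rw [pow_succ]
    have hp1 : 2 ^ (n + 1) = 2 * 2 ^ n := by rw [pow_succ']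
    have hdiv : k / 2 < 2 ^ (n + 1) := by omega
    rw [pvStrL, ih (k / 2) hdiv]
    have e1 : k % 2 ^ (n + 1) / 2 = k / 2 % 2 ^ n := by
      rw [hp1, Nat.mod_mul_right_div_self]
    have e2 : k % 2 ^ (n + 1) % 2 = k % 2 :=
      Nat.mod_mod_of_dvd k (dvd_pow_self 2 (Nat.succ_ne_zero n))
    rw [show pvStrL (n + 1) (k % 2 ^ (n + 1))
          = pvStrL n (k % 2 ^ (n + 1) / 2) ++ [Nat.digitChar (k % 2 ^ (n + 1) % 2)] from rfl,
        e1, e2]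
    by_cases hc : k < 2 ^ (n + 1)
    · rw [if_pos (show k / 2 < 2 ^ n by omega), if_pos hc]; simp
    · rw [if_neg (show ¬ k / 2 < 2 ^ n by omega), if_neg hc]; simp

lemma pvGen_eq (n : Nat) : pvGen n = (List.range (2 ^ n)).map (pvStrL n) := by
  induction n with
  | zero => rfl
  | succ n ih =>
    have hsplit : 2 ^ (n + 1) = 2 ^ n + 2 ^ n := by rw [pow_succ]; omega
    rw [pvGen, ih, hsplit, List.range_add]
    simp only [List.map_append, List.map_map]
    have hchars : "01".toList = ['0', '1'] := rfl
    rw [hchars]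
    simp only [List.flatMap_cons, List.flatMap_nil, List.append_nil]
    congr 1
    · apply List.map_congr_left
      intro k hkmem
      have hk : k < 2 ^ n := List.mem_range.mp hkmem
      simp only [Function.comp]
      rw [pvStrL_cons n k (by omega), if_pos hk, Nat.mod_eq_of_lt hk]
    · apply List.map_congr_left
      intro k hkmem
      have hk : k < 2 ^ n := List.mem_range.mp hkmem
      simp only [Function.comp]
      rw [pvStrL_cons n (2 ^ n + k) (by omega), if_neg (by omega), Nat.add_mod_left,
        Nat.mod_eq_of_lt hk]

lemma pvElemA (length : Int) (hl : 0 < length) (k : Nat) (hk : k < 2 ^ length.toNat) :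
    PySem.Str.zfill (PySem.Str.slice (PySem.Int.pyBin ((k : Nat) : Int)) (some 2) none) length
      = String.ofList (pvStrL length.toNat k) := by
  have hn1 : 1 ≤ length.toNat := by clear hk; omega
  have hsl : (PySem.Str.slice (PySem.Int.pyBin ((k : Nat) : Int)) (some 2) none).toList
      = Nat.toDigits 2 k := by
    simp [pysem, PySem.Int.pyBin, PySem.Int.toBinChars0b, show ¬ ((k : Int) < 0) by omega]
  have htl : (PySem.Str.zfill (PySem.Str.slice (PySem.Int.pyBin ((k : Nat) : Int)) (some 2) none) length).toList
      = pvStrL length.toNat k := by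
    rw [PySem.Str.toList_zfill, hsl, pvToDigits_eq, pvZfill_digits]
    exact pvDigits_pad length.toNat k hn1 hk
  rw [← String.ofList_toList
    (s := PySem.Str.zfill (PySem.Str.slice (PySem.Int.pyBin ((k : Nat) : Int)) (some 2) none) length), htl]

lemma pvLists_eq (length : Int) (hl : 0 < length) :
    (PySem.List.pyRange 0 ((2 : Int) ^ length.toNat) 1).map
        (fun i => PySem.Str.zfill (PySem.Str.slice (PySem.Int.pyBin i) (some 2) none) length)
      = (pvGen length.toNat).map String.ofList := by
  have hcast : ((2 : Int) ^ length.toNat) = ((2 ^ length.toNat : Nat) : Int) := by push_cast; ring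
  rw [hcast, PySem.List.pyRange_zero_nat, List.map_map, pvGen_eq, List.map_map]
  apply List.map_congr_left
  intro k hkmem
  have hk : k < 2 ^ length.toNat := List.mem_range.mp hkmem
  simp only [Function.comp]
  exact pvElemA length hl k hk

-- ===== VERDICT (by name: the statement is the Claim_ definition above) =====
theorem create_symbol_map_spec : Claim_equal_create_symbol_map := by
  intro length _
  show create_symbol_map length = create_symbol_map_alt length
  rw [create_symbol_map, create_symbol_map_alt]
  by_cases hl : length ≤ 0
  · rw [if_pos hl, if_pos hl]
  · rw [if_neg hl, if_neg hl, pvLists_eq length (by omega)]
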